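-- pv_equiv track=rewrite | github.com/adamnroman/chess_ai | heuristics2.py | material
-- ===== SOURCE A (Python) =====
-- def material(board_state, weight):
--     white_points = 0
--     board_state = board_state.split()[0]
--     piece_values = {'p': 1, 'b': 3, 'n': 3, 'r': 5, 'q': 9, 'k': 0}
--     for piece in board_state:
--         if piece.islower():
--             white_points -= piece_values[piece]
--         elif piece.isupper():
--             white_points += piece_values[piece.lower()]
--     return white_points * weight
-- ===== SOURCE B (Python) =====
-- def material(board_state, weight):
--     board = board_state.split()[0]
--     counts = {}
--     for ch in board:
--         counts[ch] = counts.get(ch, 0) + 1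
--     signed_values = {'p': -1, 'b': -3, 'n': -3, 'r': -5, 'q': -9, 'k': 0,
--                      'P': 1, 'B': 3, 'N': 3, 'R': 5, 'Q': 9, 'K': 0}
--     return sum(counts.get(c, 0) * v for c, v in signed_values.items()) * weight
-- ===== Notes on version B (the rewrite author's own statement) =====
-- stated objective: alternative
-- what changed: Replaces the streaming islower/isupper case analysis with a tally-then-combine pass: build a character frequency table of the placement field, then sum count*signed_value over a precomputed 12-entry signed-value table (kings 0, digits and '/' never looked up).
import Mathlib
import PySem

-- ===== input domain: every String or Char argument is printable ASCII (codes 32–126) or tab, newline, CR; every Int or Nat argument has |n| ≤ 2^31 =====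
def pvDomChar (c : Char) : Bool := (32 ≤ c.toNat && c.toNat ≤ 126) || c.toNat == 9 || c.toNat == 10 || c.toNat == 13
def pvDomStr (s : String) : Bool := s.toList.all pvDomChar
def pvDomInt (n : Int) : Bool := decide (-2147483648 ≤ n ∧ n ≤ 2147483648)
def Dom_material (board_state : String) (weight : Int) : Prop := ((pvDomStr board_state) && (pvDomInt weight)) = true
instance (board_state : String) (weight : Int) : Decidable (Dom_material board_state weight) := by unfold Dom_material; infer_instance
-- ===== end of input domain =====

-- B replaces A's streaming islower/isupper case analysis by a frequency table of the
-- placement field combined with a fixed 12-entry signed-value table (objective: alternative).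

-- ===== PORT A =====
def pieceValuesA : PySem.Dict Char Int :=
  PySem.Dict.ofList [('p', 1), ('b', 3), ('n', 3), ('r', 5), ('q', 9), ('k', 0)]

def material (board_state : String) (weight : Int) : Int :=
  -- board_state.split()[0]; Pre_ guarantees the list is nonempty (else Python raises IndexError)
  match PySem.List.pyGet? (PySem.Str.split₀ board_state) 0 with
  | none => 0
  | some bs =>
    -- 'piece_values[piece]' raises KeyError on a missing key; Pre_ excludes those inputs,
    -- so getD with default 0 agrees with Python on every admitted input.
    let white_points := bs.toList.foldl (fun acc piece =>
      if PySem.Chars.islower piece then acc - pieceValuesA.getD piece 0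
      else if PySem.Chars.isupper piece then acc + pieceValuesA.getD (PySem.Chars.lowerChar piece) 0
      else acc) 0
    white_points * weight

-- ===== PORT B =====
def signedValuesB : List (Char × Int) :=
  [('p', -1), ('b', -3), ('n', -3), ('r', -5), ('q', -9), ('k', 0),
   ('P', 1), ('B', 3), ('N', 3), ('R', 5), ('Q', 9), ('K', 0)]

def material_alt (board_state : String) (weight : Int) : Int :=
  match PySem.List.pyGet? (PySem.Str.split₀ board_state) 0 with
  | none => 0
  | some board =>
    let counts := board.toList.foldl
      (fun d ch => d.insert ch (d.getD ch 0 + 1)) (PySem.Dict.empty : PySem.Dict Char Int)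
    (signedValuesB.foldl (fun acc cv => acc + counts.getD cv.1 0 * cv.2) 0) * weight

-- ===== PRECONDITION & SPEC =====
def pieceLetters : List Char := ['p', 'b', 'n', 'r', 'q', 'k', 'P', 'B', 'N', 'R', 'Q', 'K']

-- Pre_ excludes exactly the inputs on which A raises: whitespace-only board_state
-- (split()[0] raises IndexError) and a placement field containing a cased letter
-- outside the 12 piece letters (KeyError).
def Pre_material (board_state : String) (weight : Int) : Prop :=
  PySem.Str.split₀ board_state ≠ [] ∧
  (((PySem.Str.split₀ board_state).headD "").toList.all
    (fun c => !PySem.Chars.isalpha c || decide (c ∈ pieceLetters))) = true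

instance (board_state : String) (weight : Int) : Decidable (Pre_material board_state weight) := by
  unfold Pre_material; infer_instance

def pvWitness_material : String × Int :=
  ("rnbqkbnr/pppppppp/8/8/8/8/PPPPPPPP/RNBQKBNR w KQkq - 0 1", 3)

def Spec_material (board_state : String) (weight : Int) (out : Int) : Prop :=
  out = material_alt board_state weight
instance (board_state : String) (weight : Int) (out : Int) : Decidable (Spec_material board_state weight out) := by
  unfold Spec_material; infer_instance

-- ===== CLAIM (what is proved, stated in full; the proofs are below) =====
def Claim_equal_material : Prop := ∀ (board_state : String) (weight : Int),
  Dom_material board_state weight → Pre_material board_state weight →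
  Spec_material board_state weight (material board_state weight)

-- ===== LEMMAS AND PROOFS =====

lemma ne_of_not_alpha (c k : Char) (hk : PySem.Chars.isalpha k = true)
    (hc : ¬ PySem.Chars.isalpha c = true) : c ≠ k := fun h => hc (h ▸ hk)

-- evaluations of A's dict lookups at the 12 admitted letters
lemma pv_p : pieceValuesA.getD 'p' 0 = 1 := by decide
lemma pv_b : pieceValuesA.getD 'b' 0 = 3 := by decide
lemma pv_n : pieceValuesA.getD 'n' 0 = 3 := by decide
lemma pv_r : pieceValuesA.getD 'r' 0 = 5 := by decide
lemma pv_q : pieceValuesA.getD 'q' 0 = 9 := by decide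
lemma pv_k : pieceValuesA.getD 'k' 0 = 0 := by decide
lemma pvU_P : pieceValuesA.getD (PySem.Chars.lowerChar 'P') 0 = 1 := by decide
lemma pvU_B : pieceValuesA.getD (PySem.Chars.lowerChar 'B') 0 = 3 := by decide
lemma pvU_N : pieceValuesA.getD (PySem.Chars.lowerChar 'N') 0 = 3 := by decide
lemma pvU_R : pieceValuesA.getD (PySem.Chars.lowerChar 'R') 0 = 5 := by decide
lemma pvU_Q : pieceValuesA.getD (PySem.Chars.lowerChar 'Q') 0 = 9 := by decide
lemma pvU_K : pieceValuesA.getD (PySem.Chars.lowerChar 'K') 0 = 0 := by decide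

-- B's frequency-table lookups are the character counts of the board field.
lemma countsB_getD (cs : List Char) (v : Char) :
    ((cs.foldl (fun d ch => d.insert ch (d.getD ch 0 + 1)) (PySem.Dict.empty : PySem.Dict Char Int)).getD v 0)
      = (cs.count v : Int) := by
  rw [PySem.Dict.getD_foldl_insert_add_one]
  simp

-- The loop invariant: A's streaming fold from any accumulator equals the accumulator plus
-- B's combine of per-letter counts.
lemma key_lemma (cs : List Char)
    (h : ∀ c ∈ cs, PySem.Chars.isalpha c = true → c ∈ pieceLetters) (acc : Int) :
    cs.foldl (fun acc piece =>
      if PySem.Chars.islower piece then acc - pieceValuesA.getD piece 0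
      else if PySem.Chars.isupper piece then acc + pieceValuesA.getD (PySem.Chars.lowerChar piece) 0
      else acc) acc
    = acc + signedValuesB.foldl (fun a cv => a + (cs.count cv.1 : Int) * cv.2) 0 := by
  induction cs generalizing acc with
  | nil => simp [signedValuesB]
  | cons c cs ih =>
    have hc := h c (by simp)
    have htail : ∀ x ∈ cs, PySem.Chars.isalpha x = true → x ∈ pieceLetters :=
      fun x hx => h x (by simp [hx])
    rw [List.foldl_cons, ih htail]
    by_cases hα : PySem.Chars.isalpha c = true
    · have hmem := hc hα
      simp only [pieceLetters, List.mem_cons, List.not_mem_nil, or_false] at hmem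
      rcases hmem with h|h|h|h|h|h|h|h|h|h|h|h <;> subst h <;>
        simp only [signedValuesB, List.foldl, List.count_cons, PySem.Chars.islower,
          PySem.Chars.isupper, pv_p, pv_b, pv_n, pv_r, pv_q, pv_k,
          pvU_P, pvU_B, pvU_N, pvU_R, pvU_Q, pvU_K] <;>
        simp <;> push_cast <;> ring
    · have h1 := ne_of_not_alpha c 'p' (by decide) hα
      have h2 := ne_of_not_alpha c 'b' (by decide) hα
      have h3 := ne_of_not_alpha c 'n' (by decide) hα
      have h4 := ne_of_not_alpha c 'r' (by decide) hα
      have h5 := ne_of_not_alpha c 'q' (by decide) hα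
      have h6 := ne_of_not_alpha c 'k' (by decide) hα
      have h7 := ne_of_not_alpha c 'P' (by decide) hα
      have h8 := ne_of_not_alpha c 'B' (by decide) hα
      have h9 := ne_of_not_alpha c 'N' (by decide) hα
      have h10 := ne_of_not_alpha c 'R' (by decide) hα
      have h11 := ne_of_not_alpha c 'Q' (by decide) hα
      have h12 := ne_of_not_alpha c 'K' (by decide) hα
      have hlo : PySem.Chars.islower c = false := by
        simp [PySem.Chars.isalpha] at hα; exact hα.2
      have hup : PySem.Chars.isupper c = false := by
        simp [PySem.Chars.isalpha] at hα; exact hα.1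
      simp [hlo, hup, signedValuesB, List.count_cons, h1, h2, h3, h4, h5, h6, h7, h8, h9,
        h10, h11, h12]

-- ===== VERDICT (by name: the statement is the Claim_ definition above) =====
theorem material_spec : Claim_equal_material := by
  intro board_state weight _ hpre
  obtain ⟨hne, hall⟩ := hpre
  unfold Spec_material material material_alt
  obtain ⟨bs, rest, hw⟩ : ∃ bs rest, PySem.Str.split₀ board_state = bs :: rest := by
    cases hsp : PySem.Str.split₀ board_state with
    | nil => exact absurd hsp hne
    | cons a l => exact ⟨a, l, rfl⟩
  have hget : PySem.List.pyGet? (PySem.Str.split₀ board_state) (0 : Int) = some bs := by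
    rw [hw]; simp [PySem.List.pyGet?, PySem.List.pyIdx?]
  rw [hget] at *
  rw [hw, List.headD] at hall
  have hall' : ∀ c ∈ bs.toList, PySem.Chars.isalpha c = true → c ∈ pieceLetters := by
    intro c hc hα
    have := List.all_eq_true.mp hall c hc
    simpa [hα] using this
  have hcong : signedValuesB.foldl (fun acc cv =>
      acc + (bs.toList.foldl (fun d ch => d.insert ch (d.getD ch 0 + 1))
        (PySem.Dict.empty : PySem.Dict Char Int)).getD cv.1 0 * cv.2) 0
      = signedValuesB.foldl (fun a cv => a + (bs.toList.count cv.1 : Int) * cv.2) 0 := by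
    apply PySem.List.foldl_congr_mem
    intro a cv _
    rw [countsB_getD]
  simp only []
  rw [key_lemma bs.toList hall' 0, hcong, zero_add]
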